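-- pv_equiv track=rewrite | github.com/Rena7/ArguLex | Data_parsing.py | merge_short_chunks
-- ===== SOURCE A (Python) =====
-- def merge_short_chunks(chunks, min_tokens=20):
--     if not chunks:
--         return chunks
--
--     new_chunks = []
--     current_chunk = chunks[0]
--
--     for i in range(1, len(chunks)):
--         if len(current_chunk.split()) < min_tokens:
--             current_chunk += " " + chunks[i]
--         else:
--             new_chunks.append(current_chunk)
--             current_chunk = chunks[i]
--
--     if len(current_chunk.split()) >= min_tokens:
--         new_chunks.append(current_chunk)
--
--     return new_chunks
-- ===== SOURCE B (Python) =====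
-- def merge_short_chunks(chunks, min_tokens=20):
--     if not chunks:
--         return chunks
--     counts = [len(c.split()) for c in chunks]
--     n = len(chunks)
--     out = []
--     i = 0
--     while i < n:
--         j = i + 1
--         total = counts[i]
--         while j < n and total < min_tokens:
--             total += counts[j]
--             j += 1
--         if total >= min_tokens:
--             out.append(" ".join(chunks[i:j]))
--         i = j
--     return out
-- ===== Notes on version B (the rewrite author's own statement) =====
-- stated objective: faster
-- what changed: B precomputes each chunk's token count once, then finds group boundaries with an index-based two-level scan and joins each group with a single slice, instead of A's single element fold that re-splits and re-concatenates the growing current string every iteration.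
import Mathlib
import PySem

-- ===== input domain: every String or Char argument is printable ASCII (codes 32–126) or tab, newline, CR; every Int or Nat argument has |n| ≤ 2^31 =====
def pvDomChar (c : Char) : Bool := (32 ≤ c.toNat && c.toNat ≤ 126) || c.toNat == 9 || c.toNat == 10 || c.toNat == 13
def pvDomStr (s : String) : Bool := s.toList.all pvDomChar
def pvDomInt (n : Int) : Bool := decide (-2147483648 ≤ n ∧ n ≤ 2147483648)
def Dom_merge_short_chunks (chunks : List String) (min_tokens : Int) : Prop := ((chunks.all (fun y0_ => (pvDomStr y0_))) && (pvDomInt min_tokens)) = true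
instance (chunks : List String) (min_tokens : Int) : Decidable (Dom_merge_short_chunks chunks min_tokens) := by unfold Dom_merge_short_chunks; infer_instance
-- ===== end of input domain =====

-- B replaces A's fold (which re-splits the growing concatenation each step) by precomputed
-- per-chunk token counts, an index-based boundary scan, and one slice+join per emitted group.

-- ===== PORT A =====
def merge_short_chunks (chunks : List String) (min_tokens : Int) : List String :=
  if chunks = [] then chunks
  else
    let st := (PySem.List.pyRange 1 (PySem.List.len chunks)).foldl
      (fun (st : List String × String) i =>
        if ((PySem.Str.split₀ st.2).length : Int) < min_tokens then
          (st.1, st.2 ++ " " ++ PySem.List.pyGetD chunks i "")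
        else
          (st.1 ++ [st.2], PySem.List.pyGetD chunks i ""))
      ([], PySem.List.pyGetD chunks 0 "")
    if min_tokens ≤ ((PySem.Str.split₀ st.2).length : Int) then st.1 ++ [st.2] else st.1

-- ===== PORT B =====
-- termination helper for the outer while loop (the inner scan never moves j backwards)
def mscInner (counts : List Int) (m : Int) (n : Nat) (j : Nat) (total : Int) : Nat × Int :=
  if h : j < n ∧ total < m then mscInner counts m n (j + 1) (total + counts.getD j 0)
  else (j, total)
termination_by n - j
decreasing_by omega

lemma mscInner_lt (counts : List Int) (m : Int) (n : Nat) : ∀ (j : Nat) (t : Int),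
    j ≤ (mscInner counts m n j t).1 := by
  intro j t
  induction j, t using mscInner.induct counts m n with
  | case1 j t h ih => rw [mscInner, dif_pos h]; omega
  | case2 j t h => rw [mscInner, dif_neg h]

-- outer while loop of Source B: i jumps to the boundary the inner scan found
def mscOuter (chunks : List String) (counts : List Int) (m : Int) (n : Nat) (i : Nat)
    (out : List String) : List String :=
  if h : i < n then
    let p := mscInner counts m n (i + 1) (counts.getD i 0)
    mscOuter chunks counts m n p.1
      (if m ≤ p.2 then
        out ++ [PySem.Str.join " " (PySem.List.slice chunks (some (i : Int)) (some (p.1 : Int)))]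
       else out)
  else out
termination_by n - i
decreasing_by
  have := mscInner_lt counts m n (i + 1) (counts.getD i 0)
  omega

def merge_short_chunks_alt (chunks : List String) (min_tokens : Int) : List String :=
  if chunks = [] then chunks
  else
    let counts := chunks.map (fun c => ((PySem.Str.split₀ c).length : Int))
    mscOuter chunks counts min_tokens chunks.length 0 []

-- ===== PRECONDITION & SPEC =====
def Spec_merge_short_chunks (chunks : List String) (min_tokens : Int) (out : List String) : Prop := out = merge_short_chunks_alt chunks min_tokens
instance (chunks : List String) (min_tokens : Int) (out : List String) : Decidable (Spec_merge_short_chunks chunks min_tokens out) := by unfold Spec_merge_short_chunks; infer_instance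

-- ===== CLAIM (what is proved, stated in full; the proofs are below) =====
def Claim_equal_merge_short_chunks : Prop := ∀ (chunks : List String) (min_tokens : Int), Dom_merge_short_chunks chunks min_tokens → Spec_merge_short_chunks chunks min_tokens (merge_short_chunks chunks min_tokens)

-- ===== LEMMAS AND PROOFS =====

-- token count of a string, as A computes it
def strCnt (s : String) : Int := ((PySem.Str.split₀ s).length : Int)

-- the common recursive specification both programs compute
def mscG (m : Int) : String → List String → List String
  | cur, [] => if m ≤ strCnt cur then [cur] else []
  | cur, c :: rest =>
      if strCnt cur < m then mscG m (cur ++ " " ++ c) rest else cur :: mscG m c rest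

-- ---- string/token lemmas (split₀ additivity across a single-space concatenation) ----

lemma go_acc (s : List Char) : ∀ (cur : List Char) (acc : List (List Char)),
    PySem.Chars.split₀.go s cur acc = acc.reverse ++ PySem.Chars.split₀.go s cur [] := by
  induction s with
  | nil => intro cur acc; simp [PySem.Chars.split₀.go]; split <;> simp
  | cons c rest ih =>
      intro cur acc
      simp only [PySem.Chars.split₀.go]
      split
      · split
        · exact ih [] acc
        · rw [ih [] (cur.reverse :: acc), ih [] [cur.reverse]]; simp
      · exact ih (c :: cur) acc

lemma go_mid (y : List Char) : ∀ (x cur : List Char),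
    PySem.Chars.split₀.go (x ++ ' ' :: y) cur [] =
      PySem.Chars.split₀.go x cur [] ++ PySem.Chars.split₀.go y [] [] := by
  intro x
  induction x with
  | nil =>
      intro cur
      simp only [List.nil_append, PySem.Chars.split₀.go]
      have hsp : PySem.Chars.isspace ' ' = true := by decide
      rw [if_pos hsp]
      split
      · simp
      · exact go_acc y [] [cur.reverse]
  | cons c rest ih =>
      intro cur
      simp only [List.cons_append, PySem.Chars.split₀.go]
      split
      · split
        · exact ih []
        · rw [go_acc (rest ++ ' ' :: y) [] [cur.reverse], go_acc rest [] [cur.reverse], ih []]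
          simp
      · exact ih (c :: cur)

lemma split_space (x y : List Char) :
    PySem.Chars.split₀ (x ++ ' ' :: y) = PySem.Chars.split₀ x ++ PySem.Chars.split₀ y := by
  simp [PySem.Chars.split₀, go_mid]

lemma wl_append (a b : String) : strCnt (a ++ " " ++ b) = strCnt a + strCnt b := by
  have h : (a ++ " " ++ b).toList = a.toList ++ ' ' :: b.toList := by
    simp [String.toList_append]
  simp [strCnt, PySem.Str.split₀, h, split_space]

lemma intercalate_cons2 (sep a b : List Char) (l : List (List Char)) :
    sep.intercalate (a :: b :: l) = a ++ sep ++ sep.intercalate (b :: l) := by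
  simp [List.intercalate]

lemma inter_snoc (sep c : List Char) : ∀ (a : List Char) (l : List (List Char)),
    sep.intercalate ((a :: l) ++ [c]) = sep.intercalate (a :: l) ++ sep ++ c := by
  intro a l
  induction l generalizing a with
  | nil => simp [List.intercalate]
  | cons b t ih =>
      rw [show (a :: b :: t) ++ [c] = a :: (b :: (t ++ [c])) by simp,
          intercalate_cons2, intercalate_cons2 sep a b t,
          show b :: (t ++ [c]) = (b :: t) ++ [c] by simp, ih b]
      simp

lemma join_singleton' (c : String) : PySem.Str.join " " [c] = c := by
  simp [PySem.Str.join, PySem.Chars.join, List.intercalate]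

lemma join_snoc (ps : List String) (c : String) (h : ps ≠ []) :
    PySem.Str.join " " (ps ++ [c]) = PySem.Str.join " " ps ++ " " ++ c := by
  obtain ⟨a, t, rfl⟩ : ∃ a t, ps = a :: t := by
    cases ps with
    | nil => exact absurd rfl h
    | cons a t => exact ⟨a, t, rfl⟩
  apply String.toList_inj.mp
  simp [PySem.Str.join, PySem.Chars.join, String.toList_append]
  rw [show a.toList :: (t.map String.toList ++ [c.toList])
        = (a.toList :: t.map String.toList) ++ [c.toList] by simp,
      inter_snoc]
  simp

-- ---- slice lemmas ----

-- chunks[i:j] as the port's slice computes it, for natural bounds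
lemma slice_nat (chunks : List String) (i j : Nat) :
    PySem.List.slice chunks (some (i : Int)) (some (j : Int)) = (chunks.drop i).take (j - i) :=
  PySem.List.slice_natCast chunks i j

lemma slice_singleton (chunks : List String) (i : Nat) (h : i < chunks.length) :
    (chunks.drop i).take (i + 1 - i) = [chunks.getD i ""] := by
  have : chunks.drop i = chunks.getD i "" :: chunks.drop (i + 1) := by
    rw [List.getD_eq_getElem _ _ h]
    exact (List.drop_eq_getElem_cons h)
  simp [this]

lemma slice_snoc (chunks : List String) (i j : Nat) (hij : i < j) (hj : j < chunks.length) :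
    (chunks.drop i).take (j + 1 - i) = (chunks.drop i).take (j - i) ++ [chunks.getD j ""] := by
  have h1 : j + 1 - i = (j - i) + 1 := by omega
  rw [h1, List.take_succ]
  congr 1
  rw [List.getElem?_drop, show i + (j - i) = j by omega, List.getElem?_eq_getElem hj,
      List.getD_eq_getElem _ _ hj]
  rfl

lemma slice_ne_nil (chunks : List String) (i j : Nat) (hij : i < j) (hj : j ≤ chunks.length) :
    (chunks.drop i).take (j - i) ≠ [] := by
  have : ((chunks.drop i).take (j - i)).length = j - i := by simp; omega
  intro hcontra
  rw [hcontra] at this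
  simp at this
  omega

-- join of the slice chunks[i:j]
def jsl (chunks : List String) (i j : Nat) : String :=
  PySem.Str.join " " ((chunks.drop i).take (j - i))

lemma jsl_singleton (chunks : List String) (i : Nat) (h : i < chunks.length) :
    jsl chunks i (i + 1) = chunks.getD i "" := by
  rw [jsl, slice_singleton chunks i h, join_singleton']

lemma jsl_snoc (chunks : List String) (i j : Nat) (hij : i < j) (hj : j < chunks.length) :
    jsl chunks i (j + 1) = jsl chunks i j ++ " " ++ chunks.getD j "" := by
  rw [jsl, jsl, slice_snoc chunks i j hij hj,
      join_snoc _ _ (slice_ne_nil chunks i j hij (le_of_lt hj))]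

lemma counts_getD (chunks : List String) (j : Nat) (hj : j < chunks.length) :
    (chunks.map (fun c => ((PySem.Str.split₀ c).length : Int))).getD j 0
      = strCnt (chunks.getD j "") := by
  rw [List.getD_eq_getElem _ _ (by simpa using hj), List.getD_eq_getElem _ _ hj]
  simp [strCnt]

-- ---- A's fold computes mscG ----

lemma A_eq (m : Int) (rest : List String) : ∀ (nc : List String) (cur : String),
    (if m ≤ strCnt (rest.foldl
          (fun (st : List String × String) c =>
            if strCnt st.2 < m then (st.1, st.2 ++ " " ++ c) else (st.1 ++ [st.2], c))
          (nc, cur)).2 then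
       (rest.foldl
          (fun (st : List String × String) c =>
            if strCnt st.2 < m then (st.1, st.2 ++ " " ++ c) else (st.1 ++ [st.2], c))
          (nc, cur)).1 ++
         [(rest.foldl
            (fun (st : List String × String) c =>
              if strCnt st.2 < m then (st.1, st.2 ++ " " ++ c) else (st.1 ++ [st.2], c))
            (nc, cur)).2]
     else
       (rest.foldl
          (fun (st : List String × String) c =>
            if strCnt st.2 < m then (st.1, st.2 ++ " " ++ c) else (st.1 ++ [st.2], c))
          (nc, cur)).1) = nc ++ mscG m cur rest := by
  induction rest with
  | nil =>
      intro nc cur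
      simp only [List.foldl_nil, mscG]
      split <;> simp
  | cons c rest ih =>
      intro nc cur
      simp only [List.foldl_cons]
      rw [mscG]
      by_cases h : strCnt cur < m
      · rw [if_pos h, if_pos h]
        exact ih nc (cur ++ " " ++ c)
      · rw [if_neg h, if_neg h]
        simpa using ih (nc ++ [cur]) c

-- ---- B's index loops compute mscG ----

lemma B_eq (chunks : List String) (m : Int) (counts : List Int)
    (hc : counts = chunks.map (fun c => ((PySem.Str.split₀ c).length : Int))) (k : Nat) :
    ∀ (j i : Nat) (out : List String),
    chunks.length - j ≤ k → i < j → j ≤ chunks.length →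
    mscOuter chunks counts m chunks.length
        (mscInner counts m chunks.length j (strCnt (jsl chunks i j))).1
        (if m ≤ (mscInner counts m chunks.length j (strCnt (jsl chunks i j))).2 then
           out ++ [PySem.Str.join " " (PySem.List.slice chunks (some (i : Int))
             (some ((mscInner counts m chunks.length j (strCnt (jsl chunks i j))).1 : Int)))]
         else out)
      = out ++ mscG m (jsl chunks i j) (chunks.drop j) := by
  induction k with
  | zero =>
      intro j i out hk hij hj
      have hjn : j = chunks.length := by omega
      subst hjn
      rw [mscInner, dif_neg (by omega)]
      rw [mscOuter, dif_neg (by omega)]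
      rw [List.drop_length]
      simp only [mscG, slice_nat]
      rw [show PySem.Str.join " " ((chunks.drop i).take (chunks.length - i))
            = jsl chunks i chunks.length from rfl]
      split <;> simp
  | succ k ih =>
      intro j i out hk hij hj
      by_cases hjn : j < chunks.length
      · have hd : chunks.drop j = chunks.getD j "" :: chunks.drop (j + 1) := by
          rw [List.getD_eq_getElem _ _ hjn]
          exact (List.drop_eq_getElem_cons hjn)
        by_cases ht : strCnt (jsl chunks i j) < m
        · -- inner loop takes a step
          rw [mscInner, dif_pos ⟨hjn, ht⟩]
          rw [hc, counts_getD chunks j hjn, ← hc]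
          have hcnt : strCnt (jsl chunks i j) + strCnt (chunks.getD j "")
              = strCnt (jsl chunks i (j + 1)) := by
            rw [jsl_snoc chunks i j hij hjn, wl_append]
          rw [hcnt]
          rw [ih (j + 1) i out (by omega) (by omega) (by omega), hd]
          rw [mscG, if_pos ht, jsl_snoc chunks i j hij hjn]
        · -- inner loop exits at a boundary (j < n, total ≥ m): emit and start a new group
          rw [mscInner, dif_neg (by push_neg; intro _; omega)]
          rw [mscOuter, dif_pos hjn]
          rw [hc, counts_getD chunks j hjn, ← hc]
          have hcnt : strCnt (chunks.getD j "") = strCnt (jsl chunks j (j + 1)) := by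
            rw [jsl_singleton chunks j hjn]
          rw [hcnt]
          rw [ih (j + 1) j
              (if m ≤ strCnt (jsl chunks i j) then
                 out ++ [PySem.Str.join " "
                   (PySem.List.slice chunks (some (i : Int)) (some (j : Int)))]
               else out) (by omega) (by omega) (by omega), hd]
          rw [mscG, if_neg ht, if_pos (by omega), slice_nat]
          rw [show PySem.Str.join " " ((chunks.drop i).take (j - i)) = jsl chunks i j from rfl,
              jsl_singleton chunks j hjn]
          simp
      · have hjn' : j = chunks.length := by omega
        subst hjn'
        rw [mscInner, dif_neg (by omega)]
        rw [mscOuter, dif_neg (by omega)]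
        rw [List.drop_length]
        simp only [mscG, slice_nat]
        rw [show PySem.Str.join " " ((chunks.drop i).take (chunks.length - i))
              = jsl chunks i chunks.length from rfl]
        split <;> simp

-- ===== VERDICT (by name: the statement is the Claim_ definition above) =====
theorem merge_short_chunks_spec : Claim_equal_merge_short_chunks := by
  intro chunks min_tokens _
  unfold Spec_merge_short_chunks merge_short_chunks merge_short_chunks_alt
  by_cases hnil : chunks = []
  · simp [hnil]
  · rw [if_neg hnil, if_neg hnil]
    have hn : 0 < chunks.length := List.length_pos_of_ne_nil hnil
    -- A side: fold over pyRange becomes fold over chunks.drop 1, then mscG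
    rw [PySem.List.foldl_pyRange_pyGetD chunks ""
        (fun (st : List String × String) c =>
          if ((PySem.Str.split₀ st.2).length : Int) < min_tokens then
            (st.1, st.2 ++ " " ++ c)
          else
            (st.1 ++ [st.2], c))
        ([], PySem.List.pyGetD chunks 0 "") (a := 1) (by norm_num)]
    simp only [Int.toNat_one]
    have hA := A_eq min_tokens (chunks.drop 1) [] (PySem.List.pyGetD chunks 0 "")
    simp only [strCnt] at hA
    refine hA.trans ?_
    -- B side: unfold the first outer step and apply B_eq
    rw [mscOuter, dif_pos hn]
    dsimp only
    rw [counts_getD chunks 0 hn]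
    rw [show strCnt (chunks.getD 0 "") = strCnt (jsl chunks 0 1) by
          rw [show (1 : Nat) = 0 + 1 from rfl, jsl_singleton chunks 0 hn]]
    rw [B_eq chunks min_tokens _ rfl chunks.length 1 0 [] (by omega) (by omega) (by omega)]
    simp only [List.nil_append]
    congr 1
    rw [show (1 : Nat) = 0 + 1 from rfl, jsl_singleton chunks 0 hn]
    cases chunks with
    | nil => exact absurd rfl hnil
    | cons a t => simp [PySem.List.pyGetD, PySem.List.pyGet?, PySem.List.pyIdx?]
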